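-- pv_equiv track=rewrite | github.com/brookebols/instrument-generator | select_audio.py | find_matching_pitch_groups
-- ===== SOURCE A (Python) =====
-- def find_matching_pitch_groups(data, pitch_range):
--     pitch_groups = {}
--     for key, entry in data.items():
--         pitch = entry['pitch']
--         if pitch_range[0] <= pitch <= pitch_range[1]:
--             if pitch not in pitch_groups:
--                 pitch_groups[pitch] = []
--             pitch_groups[pitch].append(entry)
--     return pitch_groups
-- ===== SOURCE B (Python) =====
-- def find_matching_pitch_groups(data, pitch_range):
--     lo, hi = pitch_range
--     matched = [entry for entry in data.values() if lo <= entry['pitch'] <= hi]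
--     pitches = dict.fromkeys(entry['pitch'] for entry in matched)
--     return {p: [e for e in matched if e['pitch'] == p] for p in pitches}
-- ===== Notes on version B (the rewrite author's own statement) =====
-- stated objective: alternative
-- what changed: A buckets entries into a dict on the fly during a single scan; B first filters the values to the in-range entries, takes the first-occurrence distinct pitches via dict.fromkeys, and builds each group by a comprehension over the filtered list.
import Mathlib
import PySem

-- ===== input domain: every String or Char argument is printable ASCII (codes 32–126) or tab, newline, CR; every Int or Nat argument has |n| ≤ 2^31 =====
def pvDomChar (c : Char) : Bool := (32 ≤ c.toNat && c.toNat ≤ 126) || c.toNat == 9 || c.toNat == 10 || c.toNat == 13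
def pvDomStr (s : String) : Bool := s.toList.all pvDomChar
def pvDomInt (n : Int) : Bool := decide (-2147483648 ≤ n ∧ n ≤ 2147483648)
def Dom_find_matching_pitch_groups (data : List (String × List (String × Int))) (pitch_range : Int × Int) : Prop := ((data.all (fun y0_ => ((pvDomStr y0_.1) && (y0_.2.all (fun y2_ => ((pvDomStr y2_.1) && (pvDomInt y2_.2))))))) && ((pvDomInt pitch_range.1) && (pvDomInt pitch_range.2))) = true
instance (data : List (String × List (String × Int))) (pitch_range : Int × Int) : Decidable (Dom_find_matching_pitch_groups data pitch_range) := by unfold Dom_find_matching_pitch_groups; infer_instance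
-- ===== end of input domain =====

-- B groups by an index-then-grouped-pass: filter once, take first-occurrence distinct pitches, build each group
-- by a scan of the filtered list — instead of A's incremental on-the-fly dict bucketing (alternative decomposition).


-- shared helper: entry['pitch'] (total via default 0; Pre_ restricts to entries that HAVE the key)
def pvPitch (e : List (String × Int)) : Int := (PySem.Dict.mk e).getD "pitch" 0

-- ===== PORT A =====
-- for key, entry in data.items(): incremental bucketing into a dict, returned as items
def find_matching_pitch_groups (data : List (String × List (String × Int))) (pitch_range : Int × Int) : List (Int × List (List (String × Int))) :=
  (data.foldl (fun pitch_groups kv =>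
      let pitch := pvPitch kv.2
      if pitch_range.1 ≤ pitch ∧ pitch ≤ pitch_range.2 then
        -- if pitch not in pitch_groups: pitch_groups[pitch] = []; pitch_groups[pitch].append(entry)
        (if pitch_groups.contains pitch then pitch_groups else pitch_groups.insert pitch []).modify
          pitch [] (fun l => l ++ [kv.2])
      else pitch_groups)
    PySem.Dict.empty).items

-- ===== PORT B =====
-- matched = filtered values; pitches = dict.fromkeys (ordered dedup); group comprehension per pitch
def find_matching_pitch_groups_alt (data : List (String × List (String × Int))) (pitch_range : Int × Int) : List (Int × List (List (String × Int))) :=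
  let matched := (data.map (·.2)).filter
    (fun e => decide (pitch_range.1 ≤ pvPitch e) && decide (pvPitch e ≤ pitch_range.2))
  let pitches := PySem.List.dedup (matched.map pvPitch)
  pitches.map (fun p => (p, matched.filter (fun e => pvPitch e == p)))

-- ===== PRECONDITION & SPEC =====
-- Pre_ excludes inputs where Python A (and B) raise KeyError: an entry without the key 'pitch'.
def Pre_find_matching_pitch_groups (data : List (String × List (String × Int))) (pitch_range : Int × Int) : Prop :=
  ∀ kv ∈ data, "pitch" ∈ kv.2.map (·.1)
instance (data : List (String × List (String × Int))) (pitch_range : Int × Int) : Decidable (Pre_find_matching_pitch_groups data pitch_range) := by unfold Pre_find_matching_pitch_groups; infer_instance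
def pvWitness_find_matching_pitch_groups : (List (String × List (String × Int))) × (Int × Int) :=
  ([("a", [("pitch", 2), ("vol", 9)]), ("b", [("pitch", 2)]), ("c", [("pitch", 5)])], (0, 3))

def Spec_find_matching_pitch_groups (data : List (String × List (String × Int))) (pitch_range : Int × Int) (out : List (Int × List (List (String × Int)))) : Prop := out = find_matching_pitch_groups_alt data pitch_range
instance (data : List (String × List (String × Int))) (pitch_range : Int × Int) (out : List (Int × List (List (String × Int)))) : Decidable (Spec_find_matching_pitch_groups data pitch_range out) := by unfold Spec_find_matching_pitch_groups; infer_instance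

-- ===== CLAIM (what is proved, stated in full; the proofs are below) =====
def Claim_equal_find_matching_pitch_groups : Prop := ∀ (data : List (String × List (String × Int))) (pitch_range : Int × Int), Dom_find_matching_pitch_groups data pitch_range → Pre_find_matching_pitch_groups data pitch_range → Spec_find_matching_pitch_groups data pitch_range (find_matching_pitch_groups data pitch_range)

-- ===== LEMMAS AND PROOFS =====

-- proof-only helper: A's dict after the loop, as a fold over (pitch, entry) pairs of the filtered list
def pvFold (ms : List (List (String × Int))) : PySem.Dict Int (List (List (String × Int))) :=
  (ms.map (fun e => (pvPitch e, e))).foldl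
    (fun d p => d.modify p.1 [] (fun l => l ++ [p.2])) PySem.Dict.empty

theorem pvFold_eq (ms : List (List (String × Int))) :
    ms.foldl (fun d e => d.modify (pvPitch e) [] (fun l => l ++ [e])) PySem.Dict.empty
      = pvFold ms := by
  unfold pvFold
  rw [List.foldl_map]

theorem pvFold_keys (ms : List (List (String × Int))) :
    (pvFold ms).keys = PySem.List.dedup (ms.map pvPitch) := by
  refine (PySem.Dict.keys_foldl_modify_key (ms.map (fun e => (pvPitch e, e))) Prod.fst []
    (fun _ p l => l ++ [p.2]) PySem.Dict.empty).trans ?_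
  simp [List.map_map, Function.comp_def, PySem.Dict.keys_empty, PySem.Set.update_nil_left,
    PySem.List.dedup_eq_ofList]

theorem pvFold_nodup_keys (ms : List (List (String × Int))) : (pvFold ms).keys.Nodup :=
  PySem.Dict.nodup_keys_foldl_modify_key (ms.map (fun e => (pvPitch e, e))) Prod.fst []
    (fun _ p l => l ++ [p.2]) PySem.Dict.empty PySem.Dict.nodup_keys_empty

theorem pvFold_getD (ms : List (List (String × Int))) (k : Int) :
    (pvFold ms).getD k [] = ms.filter (fun e => pvPitch e == k) := by
  unfold pvFold
  rw [PySem.Dict.getD_foldl_modify_append, PySem.Dict.getD_empty, List.nil_append,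
    List.filter_map, List.map_map]
  simp [Function.comp_def]

theorem pvFold_items (ms : List (List (String × Int))) :
    (pvFold ms).items
      = (PySem.List.dedup (ms.map pvPitch)).map
          (fun p => (p, ms.filter (fun e => pvPitch e == p))) := by
  rw [PySem.Dict.items_eq_map_keys (pvFold ms) (pvFold_nodup_keys ms) [], pvFold_keys]
  exact List.map_congr_left (fun k _ => by rw [pvFold_getD])

-- A's two-step "ensure key then append" equals a single modify
theorem pvStep_eq_modify (d : PySem.Dict Int (List (List (String × Int)))) (k : Int) (e : List (String × Int)) :
    (if d.contains k then d else d.insert k []).modify k [] (fun l => l ++ [e])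
      = d.modify k [] (fun l => l ++ [e]) := by
  by_cases h : d.contains k = true
  · rw [if_pos h]
  · have h' : d.contains k = false := by simpa using h
    rw [if_neg h]
    simp only [PySem.Dict.modify, PySem.Dict.getD_insert_self, PySem.Dict.insert_insert_self,
      PySem.Dict.getD_of_not_contains d [] h']

-- ===== VERDICT (by name: the statement is the Claim_ definition above) =====
theorem find_matching_pitch_groups_spec : Claim_equal_find_matching_pitch_groups := by
  intro data pr _ _
  unfold Spec_find_matching_pitch_groups find_matching_pitch_groups find_matching_pitch_groups_alt
  have hfold : data.foldl (fun pitch_groups kv =>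
        let pitch := pvPitch kv.2
        if pr.1 ≤ pitch ∧ pitch ≤ pr.2 then
          (if pitch_groups.contains pitch then pitch_groups else pitch_groups.insert pitch []).modify
            pitch [] (fun l => l ++ [kv.2])
        else pitch_groups)
      PySem.Dict.empty
      = pvFold ((data.map (·.2)).filter
          (fun e => decide (pr.1 ≤ pvPitch e) && decide (pvPitch e ≤ pr.2))) := by
    rw [← pvFold_eq]
    conv_rhs => rw [List.foldl_filter, List.foldl_map]
    refine PySem.List.foldl_congr_mem _ _ _ _ ?_
    intro d kv _
    by_cases h : pr.1 ≤ pvPitch kv.2 ∧ pvPitch kv.2 ≤ pr.2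
    · simp only [h]
      rw [if_pos (by simp)]
      exact pvStep_eq_modify d (pvPitch kv.2) kv.2
    · rw [if_neg h, if_neg (by simpa [Decidable.not_and_iff_or_not] using h)]
  rw [hfold, pvFold_items]
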